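-- pv_equiv track=rewrite | github.com/cylc/cylc-flow | lib/cylc/gui/updater_graph.py | compare_dict_of_dict
-- ===== SOURCE A (Python) =====
-- def compare_dict_of_dict(one, two):
--     """Return True if one == two, else return False."""
--     for key in one:
--         if key not in two:
--             return False
--         for subkey in one[key]:
--             if subkey not in two[key]:
--                 return False
--             if one[key][subkey] != two[key][subkey]:
--                 return False
--
--     for key in two:
--         if key not in one:
--             return False
--         for subkey in two[key]:
--             if subkey not in one[key]:
--                 return False
--             if two[key][subkey] != one[key][subkey]:
--                 return False
--
--     return True
-- ===== SOURCE B (Python) =====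
-- def compare_dict_of_dict(one, two):
--     """Return True if one == two, else return False."""
--     if len(one) != len(two):
--         return False
--     for key, sub in one.items():
--         other = two.get(key)
--         if other is None or len(sub) != len(other):
--             return False
--         for subkey, val in sub.items():
--             if subkey not in other or val != other[subkey]:
--                 return False
--     return True
-- ===== Notes on version B (the rewrite author's own statement) =====
-- stated objective: simpler
-- what changed: A makes two full symmetric passes (one vs two, then two vs one) with lookups one[key][subkey]; B makes a single forward pass over one.items() guarded by length checks at both dict levels, using the items pairs directly instead of re-looking-up values.
import Mathlib
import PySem

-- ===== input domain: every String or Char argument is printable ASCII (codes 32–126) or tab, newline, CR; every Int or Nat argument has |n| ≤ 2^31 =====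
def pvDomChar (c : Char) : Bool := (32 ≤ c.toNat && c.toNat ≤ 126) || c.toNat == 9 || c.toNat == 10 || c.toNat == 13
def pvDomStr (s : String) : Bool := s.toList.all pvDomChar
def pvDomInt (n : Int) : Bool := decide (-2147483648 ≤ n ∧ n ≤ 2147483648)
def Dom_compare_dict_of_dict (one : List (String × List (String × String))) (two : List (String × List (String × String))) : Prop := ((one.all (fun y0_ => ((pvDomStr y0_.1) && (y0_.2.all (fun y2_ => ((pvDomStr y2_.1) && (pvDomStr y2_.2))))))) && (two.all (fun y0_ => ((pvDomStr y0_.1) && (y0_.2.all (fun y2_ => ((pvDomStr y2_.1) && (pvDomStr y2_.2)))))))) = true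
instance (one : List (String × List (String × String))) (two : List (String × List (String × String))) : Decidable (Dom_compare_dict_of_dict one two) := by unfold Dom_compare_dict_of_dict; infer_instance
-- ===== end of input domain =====

-- B replaces A's two symmetric full passes by one length-guarded forward pass (same return value; no mutation).

-- ===== PORT A =====
-- inner loop "for subkey in one[key]: …" of A (a = one[key], b = two[key])
def cddSub (a : PySem.Dict String String) (b : PySem.Dict String String) : Bool :=
  a.keys.all (fun sk => b.contains sk && (a.getD sk "" == b.getD sk ""))

-- one of A's two symmetric passes: "for key in x: if key not in y: … for subkey in x[key]: …"
def cddPass (x : PySem.Dict String (List (String × String))) (y : PySem.Dict String (List (String × String))) : Bool :=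
  x.keys.all (fun k => y.contains k && cddSub (PySem.Dict.mk (x.getD k [])) (PySem.Dict.mk (y.getD k [])))

def compare_dict_of_dict (one : List (String × List (String × String))) (two : List (String × List (String × String))) : Bool :=
  cddPass (PySem.Dict.mk one) (PySem.Dict.mk two) && cddPass (PySem.Dict.mk two) (PySem.Dict.mk one)

-- ===== PORT B =====
-- B's inner loop "for subkey, val in sub.items(): …"
def cddAltSub (sub : List (String × String)) (other : List (String × String)) : Bool :=
  sub.all (fun q => match (PySem.Dict.mk other).get? q.1 with
    | none => false
    | some w => q.2 == w)

def compare_dict_of_dict_alt (one : List (String × List (String × String))) (two : List (String × List (String × String))) : Bool :=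
  if one.length ≠ two.length then false
  else one.all (fun p => match (PySem.Dict.mk two).get? p.1 with
    | none => false
    | some other => p.2.length == other.length && cddAltSub p.2 other)

-- ===== PRECONDITION & SPEC =====
-- Pre_ only requires that the association lists have pairwise-distinct keys at both levels, i.e. that they
-- actually represent Python dicts; no Python input is excluded (a Python dict cannot carry duplicate keys).
def Pre_compare_dict_of_dict (one : List (String × List (String × String))) (two : List (String × List (String × String))) : Prop :=
  (one.map Prod.fst).Nodup ∧ (∀ p ∈ one, (p.2.map Prod.fst).Nodup) ∧
  (two.map Prod.fst).Nodup ∧ (∀ p ∈ two, (p.2.map Prod.fst).Nodup)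
instance (one : List (String × List (String × String))) (two : List (String × List (String × String))) : Decidable (Pre_compare_dict_of_dict one two) := by unfold Pre_compare_dict_of_dict; infer_instance

def pvWitness_compare_dict_of_dict : (List (String × List (String × String))) × (List (String × List (String × String))) :=
  ([("a", [("x", "1")])], [("a", [("x", "1")])])

def Spec_compare_dict_of_dict (one : List (String × List (String × String))) (two : List (String × List (String × String))) (out : Bool) : Prop := out = compare_dict_of_dict_alt one two
instance (one : List (String × List (String × String))) (two : List (String × List (String × String))) (out : Bool) : Decidable (Spec_compare_dict_of_dict one two out) := by unfold Spec_compare_dict_of_dict; infer_instance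

-- ===== CLAIM (what is proved, stated in full; the proofs are below) =====
def Claim_equal_compare_dict_of_dict : Prop := ∀ (one : List (String × List (String × String))) (two : List (String × List (String × String))), Dom_compare_dict_of_dict one two → Pre_compare_dict_of_dict one two → Spec_compare_dict_of_dict one two (compare_dict_of_dict one two)

-- ===== LEMMAS AND PROOFS =====

set_option maxRecDepth 8000

-- get? on a literal association list with distinct keys is exactly "the entry is in the list"
theorem get?_mk_of_mem {ν : Type} {l : List (String × ν)} {k : String} {v : ν}
    (hnd : (l.map Prod.fst).Nodup) (h : (k, v) ∈ l) : (PySem.Dict.mk l).get? k = some v :=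
  PySem.Dict.get?_of_mem_items _ h (by simpa [PySem.Dict.keys] using hnd)

theorem mem_of_get?_mk {ν : Type} {l : List (String × ν)} {k : String} {v : ν}
    (h : (PySem.Dict.mk l).get? k = some v) : (k, v) ∈ l :=
  PySem.Dict.mem_items_of_get?_eq_some _ h

theorem getD_mk_of_mem {ν : Type} {l : List (String × ν)} {k : String} {v : ν} (d : ν)
    (hnd : (l.map Prod.fst).Nodup) (h : (k, v) ∈ l) : (PySem.Dict.mk l).getD k d = v := by
  rw [PySem.Dict.getD_eq_get?_getD, get?_mk_of_mem hnd h]; rfl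

-- B's inner loop, characterised
theorem altSub_iff (a b : List (String × String)) :
    cddAltSub a b = true ↔ ∀ q ∈ a, (PySem.Dict.mk b).get? q.1 = some q.2 := by
  simp only [cddAltSub, List.all_eq_true]
  refine forall_congr' fun q => forall_congr' fun _ => ?_
  cases hb : (PySem.Dict.mk b).get? q.1 with
  | none => simp
  | some w =>
    simp only [beq_iff_eq, Option.some.injEq]
    exact ⟨fun h => h ▸ rfl, fun h => h.symm⟩

-- A's inner loop agrees with B's inner loop as soon as the left list has distinct keys
theorem sub_eq_altSub (a b : List (String × String)) (ha : (a.map Prod.fst).Nodup) :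
    cddSub (PySem.Dict.mk a) (PySem.Dict.mk b) = cddAltSub a b := by
  rw [Bool.eq_iff_iff, altSub_iff]
  simp only [cddSub, List.all_eq_true, PySem.Dict.keys, List.mem_map]
  constructor
  · rintro H q hq
    have h' := H q.1 ⟨q, hq, rfl⟩
    rw [Bool.and_eq_true] at h'
    obtain ⟨hc, he⟩ := h'
    rw [PySem.Dict.contains_eq_isSome_get?] at hc
    cases hbq : (PySem.Dict.mk b).get? q.1 with
    | none => rw [hbq] at hc; simp at hc
    | some w =>
      rw [getD_mk_of_mem "" ha hq] at he
      have h3 : (PySem.Dict.mk b).getD q.1 "" = w := by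
        rw [PySem.Dict.getD_eq_get?_getD, hbq]; rfl
      rw [h3, beq_iff_eq] at he
      rw [he]
  · rintro H x ⟨q, hq, rfl⟩
    have hbq := H q hq
    rw [Bool.and_eq_true, PySem.Dict.contains_eq_isSome_get?, hbq]
    have h3 : (PySem.Dict.mk b).getD q.1 "" = q.2 := by
      rw [PySem.Dict.getD_eq_get?_getD, hbq]; rfl
    rw [getD_mk_of_mem "" ha hq, h3]
    exact ⟨rfl, by simp⟩

-- distinct lists that contain each other's elements have equal length
theorem len_eq_of_mutual {α : Type} {a b : List α} (ha : a.Nodup) (hb : b.Nodup)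
    (hab : a ⊆ b) (hba : b ⊆ a) : a.length = b.length :=
  le_antisymm (ha.subperm hab).length_le (hb.subperm hba).length_le

-- b ⊆ a from a ⊆ b, Nodup a, equal lengths
theorem subset_rev_of_len {α : Type} {a b : List α} (ha : a.Nodup) (hab : a ⊆ b)
    (hlen : a.length = b.length) : b ⊆ a :=
  fun _ hx => ((ha.subperm hab).perm_of_length_le (le_of_eq hlen.symm)).symm.subset hx

-- the inner bidirectional check of A equals the length-guarded forward check of B
theorem inner_core (a b : List (String × String)) (ha : (a.map Prod.fst).Nodup)
    (hb : (b.map Prod.fst).Nodup) :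
    (cddAltSub a b && cddAltSub b a) = ((a.length == b.length) && cddAltSub a b) := by
  rw [Bool.eq_iff_iff]
  simp only [Bool.and_eq_true, beq_iff_eq, altSub_iff]
  constructor
  · rintro ⟨hab, hba⟩
    have h1 : a ⊆ b := fun q hq => by
      have := hab q hq; exact mem_of_get?_mk ((Prod.mk.eta (p := q)) ▸ this)
    have h2 : b ⊆ a := fun q hq => by
      have := hba q hq; exact mem_of_get?_mk ((Prod.mk.eta (p := q)) ▸ this)
    exact ⟨len_eq_of_mutual (ha.of_map _) (hb.of_map _) h1 h2, hab⟩
  · rintro ⟨hlen, hab⟩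
    refine ⟨hab, fun q hq => ?_⟩
    have h1 : a ⊆ b := fun q hq => by
      have := hab q hq; exact mem_of_get?_mk ((Prod.mk.eta (p := q)) ▸ this)
    have h2 : b ⊆ a := subset_rev_of_len (ha.of_map _) h1 (by simpa using hlen)
    exact get?_mk_of_mem ha (h2 hq)

-- one of A's passes, characterised (x side has distinct keys)
theorem pass_iff (x y : List (String × List (String × String))) (hx : (x.map Prod.fst).Nodup) :
    cddPass (PySem.Dict.mk x) (PySem.Dict.mk y) = true ↔
      ∀ p ∈ x, ∃ o, (PySem.Dict.mk y).get? p.1 = some o ∧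
        cddSub (PySem.Dict.mk p.2) (PySem.Dict.mk o) = true := by
  simp only [cddPass, List.all_eq_true, PySem.Dict.keys, List.mem_map]
  constructor
  · rintro H p hp
    have h' := H p.1 ⟨p, hp, rfl⟩
    rw [Bool.and_eq_true] at h'
    obtain ⟨hc, hs⟩ := h'
    rw [PySem.Dict.contains_eq_isSome_get?] at hc
    cases hyo : (PySem.Dict.mk y).get? p.1 with
    | none => rw [hyo] at hc; simp at hc
    | some o =>
      refine ⟨o, rfl, ?_⟩
      have hyv : (PySem.Dict.mk y).getD p.1 [] = o := by
        rw [PySem.Dict.getD_eq_get?_getD, hyo]; rfl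
      rw [getD_mk_of_mem [] hx hp, hyv] at hs
      exact hs
  · rintro H q ⟨p, hp, rfl⟩
    obtain ⟨o, hyo, hs⟩ := H p hp
    have hyv : (PySem.Dict.mk y).getD p.1 [] = o := by
      rw [PySem.Dict.getD_eq_get?_getD, hyo]; rfl
    rw [Bool.and_eq_true, PySem.Dict.contains_eq_isSome_get?, hyo,
      getD_mk_of_mem [] hx hp, hyv]
    exact ⟨rfl, hs⟩

-- B, characterised
theorem alt_iff (one two : List (String × List (String × String))) :
    compare_dict_of_dict_alt one two = true ↔
      one.length = two.length ∧ ∀ p ∈ one, ∃ o, (PySem.Dict.mk two).get? p.1 = some o ∧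
        p.2.length = o.length ∧ cddAltSub p.2 o = true := by
  simp only [compare_dict_of_dict_alt]
  split_ifs with h
  · simp [h]
  · have hl := not_ne_iff.mp h
    simp only [List.all_eq_true]
    constructor
    · intro H
      refine ⟨hl, fun p hp => ?_⟩
      have h' := H p hp
      cases ho : (PySem.Dict.mk two).get? p.1 with
      | none => rw [ho] at h'; simp at h'
      | some o =>
        rw [ho] at h'
        rw [Bool.and_eq_true, beq_iff_eq] at h'
        exact ⟨o, rfl, h'⟩
    · rintro ⟨-, H⟩ p hp
      obtain ⟨o, ho, hlen, hs⟩ := H p hp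
      rw [ho, Bool.and_eq_true, beq_iff_eq]
      exact ⟨hlen, hs⟩

-- ===== VERDICT (by name: the statement is the Claim_ definition above) =====
theorem compare_dict_of_dict_spec : Claim_equal_compare_dict_of_dict := by
  intro one two _ hpre
  obtain ⟨h1, h1s, h2, h2s⟩ := hpre
  unfold Spec_compare_dict_of_dict compare_dict_of_dict
  rw [Bool.eq_iff_iff]
  simp only [Bool.and_eq_true, pass_iff one two h1, pass_iff two one h2, alt_iff]
  have hv2 : ∀ {k : String} {o : List (String × String)},
      (PySem.Dict.mk two).get? k = some o → (o.map Prod.fst).Nodup := fun h =>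
    h2s _ (mem_of_get?_mk h)
  constructor
  · rintro ⟨hfwd, hbwd⟩
    have hk1 : one.map Prod.fst ⊆ two.map Prod.fst := by
      intro x hx
      obtain ⟨p, hp, rfl⟩ := List.mem_map.mp hx
      obtain ⟨o, hyo, -⟩ := hfwd p hp
      exact List.mem_map.mpr ⟨(p.1, o), mem_of_get?_mk hyo, rfl⟩
    have hk2 : two.map Prod.fst ⊆ one.map Prod.fst := by
      intro x hx
      obtain ⟨p, hp, rfl⟩ := List.mem_map.mp hx
      obtain ⟨o, hyo, -⟩ := hbwd p hp
      exact List.mem_map.mpr ⟨(p.1, o), mem_of_get?_mk hyo, rfl⟩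
    have hlen : one.length = two.length := by
      simpa using len_eq_of_mutual h1 h2 hk1 hk2
    refine ⟨hlen, fun p hp => ?_⟩
    obtain ⟨o, hyo, hs⟩ := hfwd p hp
    obtain ⟨d, hxd, hs'⟩ := hbwd (p.1, o) (mem_of_get?_mk hyo)
    rw [get?_mk_of_mem h1 hp] at hxd
    obtain rfl : p.2 = d := Option.some.inj hxd
    have hnp := h1s p hp
    have hno := hv2 hyo
    rw [sub_eq_altSub _ _ hnp] at hs
    rw [sub_eq_altSub _ _ hno] at hs'
    have hcore := inner_core p.2 o hnp hno
    rw [Bool.eq_iff_iff, Bool.and_eq_true, Bool.and_eq_true] at hcore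
    obtain ⟨hl, -⟩ := (hcore.mp ⟨hs, hs'⟩)
    exact ⟨o, hyo, by simpa using hl, hs⟩
  · rintro ⟨hlen, hfwd⟩
    have hk1 : one.map Prod.fst ⊆ two.map Prod.fst := by
      intro x hx
      obtain ⟨p, hp, rfl⟩ := List.mem_map.mp hx
      obtain ⟨o, hyo, -⟩ := hfwd p hp
      exact List.mem_map.mpr ⟨(p.1, o), mem_of_get?_mk hyo, rfl⟩
    have hk2 : two.map Prod.fst ⊆ one.map Prod.fst :=
      subset_rev_of_len h1 hk1 (by simpa using hlen)
    constructor
    · intro p hp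
      obtain ⟨o, hyo, -, hs⟩ := hfwd p hp
      exact ⟨o, hyo, by rw [sub_eq_altSub _ _ (h1s p hp)]; exact hs⟩
    · intro q hq
      obtain ⟨p, hp, hpq⟩ := List.mem_map.mp (hk2 (List.mem_map.mpr ⟨q, hq, rfl⟩))
      obtain ⟨o, hyo, hl, hs⟩ := hfwd p hp
      have hq2 : (PySem.Dict.mk two).get? q.1 = some q.2 := get?_mk_of_mem h2 hq
      rw [hpq] at hyo
      obtain rfl : o = q.2 := Option.some.inj (hyo.symm.trans hq2)
      have hnp := h1s p hp
      have hnq := h2s q hq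
      refine ⟨p.2, by rw [← hpq]; exact get?_mk_of_mem h1 hp, ?_⟩
      have hcore := inner_core p.2 q.2 hnp hnq
      rw [Bool.eq_iff_iff, Bool.and_eq_true, Bool.and_eq_true] at hcore
      obtain ⟨-, hs'⟩ := hcore.mpr ⟨by simpa using hl, hs⟩
      rw [sub_eq_altSub _ _ hnq]
      exact hs'
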